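-- pv_equiv track=rewrite | github.com/Lapis0875/PS-Study | boj/08XXX/8913/solution.py | dfs
-- ===== SOURCE A (Python) =====
-- def get_group_len(part):
--     return part[1] - part[0]
--
-- def dfs(string_groups):
--     """
--     Backtracking (DFS with condition) using string's group information.
--
--     Arguments:
--         string_groups (list[tuple[int, int]]): list of group info(tuple of two integers: start & end index)
--     """
--     if len(string_groups) == 1: # end of dfs
--         res = string_groups[0][1] - string_groups[0][0] >= 2 # return whether we can remove last part.
--         return res
--
--     res = False
--     # Case 1. Remove first elem
--     if get_group_len(string_groups[0]) >= 2:
--         res = dfs([*string_groups[1:]])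
--     # Case 2. Remove middle elem
--     for gruop_idx in range(1, len(string_groups) - 1):
--         diff = get_group_len(string_groups[gruop_idx])
--         if diff < 2:
--             continue
--         left = [*string_groups[:gruop_idx - 1]]
--         mid = (string_groups[gruop_idx - 1][0], string_groups[gruop_idx + 1][1] - diff)
--         left.append(mid)
--         if gruop_idx < len(string_groups) - 2:
--             left.extend(map(lambda p: (p[0] - diff, p[1] - diff), string_groups[gruop_idx+2:]))
--         res = dfs(left)
--         if res:
--             break
--     # Case 3. Remove last elem
--     if not res and get_group_len(string_groups[-1]) >= 2:
--         res = dfs([*string_groups[:-1]])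
--     return res
-- ===== SOURCE B (Python) =====
-- def dfs(string_groups):
--     """Memoized search over the abstract state (group lengths interleaved with
--     inter-group gaps), instead of re-running the plain DFS on raw index pairs."""
--     v = []
--     prev = None
--     for s, e in string_groups:
--         if prev is not None:
--             v.append(s - prev)
--         v.append(e - s)
--         prev = e
--     memo = {}
--
--     def solve(v):
--         if len(v) == 1:
--             return v[0] >= 2
--         cached = memo.get(v)
--         if cached is not None:
--             return cached
--         m = len(v) // 2  # number of groups minus one
--         res = False
--         if v[0] >= 2:
--             res = solve(v[2:])
--         for i in range(1, m):
--             if v[2 * i] < 2: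
--                 continue
--             child = v[:2 * i - 2] \
--                 + (v[2 * i - 2] + v[2 * i - 1] + v[2 * i + 1] + v[2 * i + 2],) \
--                 + v[2 * i + 3:]
--             res = solve(child)
--             if res:
--                 break
--         if not res and v[-1] >= 2:
--             res = solve(v[:-2])
--         memo[v] = res
--         return res
--
--     return solve(tuple(v))
-- ===== Notes on version B (the rewrite author's own statement) =====
-- stated objective: faster
-- what changed: B abstracts each state to the tuple of group lengths interleaved with inter-group gaps and memoizes solve() per abstract state in a dict, instead of A's plain DFS that recomputes identical subproblems on raw (start,end) pair lists.
import Mathlib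
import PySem

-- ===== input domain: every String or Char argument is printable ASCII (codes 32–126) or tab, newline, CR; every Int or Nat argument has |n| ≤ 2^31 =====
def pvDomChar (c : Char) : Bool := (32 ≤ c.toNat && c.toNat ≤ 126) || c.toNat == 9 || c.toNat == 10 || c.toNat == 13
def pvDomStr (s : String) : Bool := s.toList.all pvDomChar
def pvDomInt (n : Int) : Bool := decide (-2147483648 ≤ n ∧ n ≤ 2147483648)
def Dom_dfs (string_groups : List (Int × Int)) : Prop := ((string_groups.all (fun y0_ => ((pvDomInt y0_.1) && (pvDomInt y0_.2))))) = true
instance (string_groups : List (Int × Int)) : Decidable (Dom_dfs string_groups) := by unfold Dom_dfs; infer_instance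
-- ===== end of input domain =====

-- B replaces A's plain exponential DFS on raw (start, end) index pairs by a memoized
-- search on the abstract state of group lengths interleaved with inter-group gaps.

-- ===== PORT A =====
def get_group_len (part : Int × Int) : Int := part.2 - part.1

-- A's middle for-loop (for gruop_idx in range(1, len-1)) with its continue/break,
-- carrying res; `rec` is the recursive dfs call.
def dfsMidLoop (rec : List (Int × Int) → Bool) (groups : List (Int × Int)) :
    List Int → Bool → Bool
  | [], res => res
  | idx :: rest, res =>
    let diff := get_group_len ((PySem.List.pyGet? groups idx).getD (0, 0))
    if diff < 2 then dfsMidLoop rec groups rest res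
    else
      let left := PySem.List.slice groups none (some (idx - 1))
      let mid := (((PySem.List.pyGet? groups (idx - 1)).getD (0, 0)).1,
                  ((PySem.List.pyGet? groups (idx + 1)).getD (0, 0)).2 - diff)
      let left := left ++ [mid]
      let left :=
        if idx < (groups.length : Int) - 2 then
          left ++ (PySem.List.slice groups (some (idx + 2)) none).map
            (fun p => (p.1 - diff, p.2 - diff))
        else left
      let res := rec left
      if res then res else dfsMidLoop rec groups rest res

-- fuel bounds the recursion depth; every recursive call shortens the list,
-- so fuel = length suffices and the 0 case is never reached on nonempty input
def dfsFuel : Nat → List (Int × Int) → Bool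
  | 0, _ => false
  | fuel + 1, groups =>
    if groups.length == 1 then
      decide (((PySem.List.pyGet? groups 0).getD (0, 0)).2
              - ((PySem.List.pyGet? groups 0).getD (0, 0)).1 ≥ 2)
    else
      let res :=
        if get_group_len ((PySem.List.pyGet? groups 0).getD (0, 0)) ≥ 2 then
          dfsFuel fuel (PySem.List.slice groups (some 1) none)
        else false
      let res := dfsMidLoop (dfsFuel fuel) groups
        (PySem.List.pyRange 1 ((groups.length : Int) - 1) 1) res
      if !res && get_group_len ((PySem.List.pyGet? groups (-1)).getD (0, 0)) ≥ 2 then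
        dfsFuel fuel (PySem.List.slice groups none (some (-1)))
      else res

def dfs (string_groups : List (Int × Int)) : Bool :=
  dfsFuel string_groups.length string_groups

-- ===== PORT B =====
-- abstract state: [len0, gap0, len1, gap1, ..., len_{n-1}] built by B's first loop
def buildAbs (string_groups : List (Int × Int)) : List Int :=
  (string_groups.foldl
    (fun (st : List Int × Option Int) p =>
      let v := match st.2 with
        | some prev => st.1 ++ [p.1 - prev]
        | none => st.1
      (v ++ [p.2 - p.1], some p.2))
    ([], none)).1

-- the child state built in B's middle loop: v[:2i-2] + (sum of the four
-- neighbouring entries,) + v[2i+3:]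
def midChildP (v : List Int) (i : Int) : List Int :=
  PySem.List.slice v none (some (2 * i - 2))
    ++ [(PySem.List.pyGet? v (2 * i - 2)).getD 0 + (PySem.List.pyGet? v (2 * i - 1)).getD 0
        + (PySem.List.pyGet? v (2 * i + 1)).getD 0 + (PySem.List.pyGet? v (2 * i + 2)).getD 0]
    ++ PySem.List.slice v (some (2 * i + 3)) none

-- B's middle loop over i in range(1, m), threading res and the memo dict
def solveMidLoop (rec : List Int → PySem.Dict (List Int) Bool → Bool × PySem.Dict (List Int) Bool)
    (v : List Int) :
    List Int → Bool → PySem.Dict (List Int) Bool → Bool × PySem.Dict (List Int) Bool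
  | [], res, memo => (res, memo)
  | i :: rest, res, memo =>
    if (PySem.List.pyGet? v (2 * i)).getD 0 < 2 then solveMidLoop rec v rest res memo
    else
      let r := rec (midChildP v i) memo
      if r.1 then r else solveMidLoop rec v rest r.1 r.2

-- B's solve(v) with memoization; fuel = number of groups suffices
def solveFuel : Nat → List Int → PySem.Dict (List Int) Bool → Bool × PySem.Dict (List Int) Bool
  | 0, _, memo => (false, memo)
  | fuel + 1, v, memo =>
    if v.length == 1 then (decide ((PySem.List.pyGet? v 0).getD 0 ≥ 2), memo)
    else
      match memo.get? v with
      | some b => (b, memo)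
      | none =>
        let m : Int := PySem.Int.floordiv (v.length : Int) 2
        let st :=
          if (PySem.List.pyGet? v 0).getD 0 ≥ 2 then
            solveFuel fuel (PySem.List.slice v (some 2) none) memo
          else (false, memo)
        let st := solveMidLoop (solveFuel fuel) v (PySem.List.pyRange 1 m 1) st.1 st.2
        let st :=
          if !st.1 && (PySem.List.pyGet? v (-1)).getD 0 ≥ 2 then
            solveFuel fuel (PySem.List.slice v none (some (-2))) st.2
          else st
        (st.1, st.2.insert v st.1)

def dfs_alt (string_groups : List (Int × Int)) : Bool :=
  (solveFuel string_groups.length (buildAbs string_groups) PySem.Dict.empty).1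

-- ===== PRECONDITION & SPEC =====
-- Pre_ excludes only the empty list, on which both A and B raise IndexError.
def Pre_dfs (string_groups : List (Int × Int)) : Prop := string_groups ≠ []
instance (string_groups : List (Int × Int)) : Decidable (Pre_dfs string_groups) := by unfold Pre_dfs; infer_instance
def pvWitness_dfs : (List (Int × Int)) := [(0, 2), (2, 3)]

def Spec_dfs (string_groups : List (Int × Int)) (out : Bool) : Prop := out = dfs_alt string_groups
instance (string_groups : List (Int × Int)) (out : Bool) : Decidable (Spec_dfs string_groups out) := by unfold Spec_dfs; infer_instance

-- ===== CLAIM (what is proved, stated in full; the proofs are below) =====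
def Claim_equal_dfs : Prop := ∀ (string_groups : List (Int × Int)), Dom_dfs string_groups → Pre_dfs string_groups → Spec_dfs string_groups (dfs string_groups)

-- ===== LEMMAS AND PROOFS =====

-- memo-free mirror of solveFuel / solveMidLoop (proof-side only)
def specMidLoop (rec : List Int → Bool) (v : List Int) : List Int → Bool → Bool
  | [], res => res
  | i :: rest, res =>
    if (PySem.List.pyGet? v (2 * i)).getD 0 < 2 then specMidLoop rec v rest res
    else
      let r := rec (midChildP v i)
      if r then r else specMidLoop rec v rest r

def GF : Nat → List Int → Bool
  | 0, _ => false
  | fuel + 1, v =>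
    if v.length == 1 then decide ((PySem.List.pyGet? v 0).getD 0 ≥ 2)
    else
      let m : Int := PySem.Int.floordiv (v.length : Int) 2
      let res :=
        if (PySem.List.pyGet? v 0).getD 0 ≥ 2 then
          GF fuel (PySem.List.slice v (some 2) none)
        else false
      let res := specMidLoop (GF fuel) v (PySem.List.pyRange 1 m 1) res
      if !res && (PySem.List.pyGet? v (-1)).getD 0 ≥ 2 then
        GF fuel (PySem.List.slice v none (some (-2)))
      else res

-- the abstraction: lengths interleaved with gaps
def shiftP (d : Int) (p : Int × Int) : Int × Int := (p.1 - d, p.2 - d)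

def absFrom : Int → List (Int × Int) → List Int
  | _, [] => []
  | p, q :: t => (q.1 - p) :: (q.2 - q.1) :: absFrom q.2 t

def absSpec : List (Int × Int) → List Int
  | [] => []
  | q :: t => (q.2 - q.1) :: absFrom q.2 t

-- canonical (index k = removed-group-number minus 1) forms of the middle-removal children
def achildK (g : List (Int × Int)) (k : Nat) : List (Int × Int) :=
  g.take k
    ++ [((g.getD k (0, 0)).1, (g.getD (k + 2) (0, 0)).2 - get_group_len (g.getD (k + 1) (0, 0)))]
    ++ (g.drop (k + 3)).map (shiftP (get_group_len (g.getD (k + 1) (0, 0))))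

def bchildK (v : List Int) (k : Nat) : List Int :=
  v.take (2 * k)
    ++ [v.getD (2 * k) 0 + v.getD (2 * k + 1) 0 + v.getD (2 * k + 3) 0 + v.getD (2 * k + 4) 0]
    ++ v.drop (2 * k + 5)

def bchildWK (w : List Int) (k : Nat) : List Int :=
  w.take (2 * k + 1)
    ++ [w.getD (2 * k + 1) 0 + w.getD (2 * k + 2) 0 + w.getD (2 * k + 4) 0 + w.getD (2 * k + 5) 0]
    ++ w.drop (2 * k + 6)

lemma absFrom_cons (p : Int) (q : Int × Int) (t : List (Int × Int)) :
    absFrom p (q :: t) = (q.1 - p) :: absSpec (q :: t) := by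
  simp [absFrom, absSpec]

lemma absFrom_length (g : List (Int × Int)) (p : Int) : (absFrom p g).length = 2 * g.length := by
  induction g generalizing p with
  | nil => simp [absFrom]
  | cons q t ih => simp [absFrom, ih]; omega

lemma absSpec_length (g : List (Int × Int)) (h : g ≠ []) :
    (absSpec g).length = 2 * g.length - 1 := by
  cases g with
  | nil => simp at h
  | cons q t => simp [absSpec, absFrom_length]; omega

lemma absFrom_shift (g : List (Int × Int)) (p d : Int) :
    absFrom (p - d) (g.map (shiftP d)) = absFrom p g := by
  induction g generalizing p with
  | nil => simp [absFrom]
  | cons q t ih =>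
    simp only [List.map_cons, absFrom, shiftP]
    exact congrArg₂ List.cons (by ring) (congrArg₂ List.cons (by ring) (ih q.2))

lemma absFrom_len_at (g : List (Int × Int)) (p : Int) (j : Nat) (h : j < g.length) :
    (absFrom p g).getD (2 * j + 1) 0 = get_group_len (g.getD j (0, 0)) := by
  induction j generalizing g p with
  | zero =>
    cases g with
    | nil => simp at h
    | cons q t => simp [absFrom, get_group_len]
  | succ j ih =>
    cases g with
    | nil => simp at h
    | cons q t =>
      have e : 2 * (j + 1) + 1 = (2 * j + 1) + 1 + 1 := by ring
      rw [e]
      simp only [absFrom, List.getD_cons_succ, List.getD_cons_succ]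
      exact ih t q.2 (by simpa using h)

lemma absSpec_len_at (g : List (Int × Int)) (j : Nat) (h : j < g.length) :
    (absSpec g).getD (2 * j) 0 = get_group_len (g.getD j (0, 0)) := by
  have key := absFrom_len_at g 0 j h
  cases g with
  | nil => simp at h
  | cons q t =>
    rw [absFrom_cons] at key
    simpa using key

lemma absFrom_last : ∀ (g : List (Int × Int)) (p : Int) (q : Int × Int),
    g.getLast? = some q → (absFrom p g).getLast? = some (get_group_len q) := by
  intro g
  induction g with
  | nil => intro p q h; simp at h
  | cons a t ih =>
    intro p q h
    cases t with
    | nil =>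
      simp at h
      subst h
      simp [absFrom, get_group_len]
    | cons r t' =>
      rw [List.getLast?_cons_cons] at h
      simp only [absFrom]
      rw [List.getLast?_cons_cons, List.getLast?_cons_cons]
      exact ih a.2 q h

lemma absSpec_last (g : List (Int × Int)) (q : Int × Int) (h : g.getLast? = some q) :
    (absSpec g).getLast? = some (get_group_len q) := by
  cases g with
  | nil => simp at h
  | cons a t =>
    cases t with
    | nil =>
      simp at h
      subst h
      simp [absSpec, absFrom, get_group_len]
    | cons r t' =>
      rw [List.getLast?_cons_cons] at h
      simp only [absSpec]
      rw [show absFrom a.2 (r :: t') = (r.1 - a.2) :: (r.2 - r.1) :: absFrom r.2 t' from rfl]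
      rw [List.getLast?_cons_cons]
      exact absFrom_last (r :: t') a.2 q h

lemma absSpec_drop2 (a : Int × Int) (t : List (Int × Int)) (h : t ≠ []) :
    (absSpec (a :: t)).drop 2 = absSpec t := by
  cases t with
  | nil => simp at h
  | cons r t' => simp [absSpec, absFrom]

lemma absFrom_dropLast (g : List (Int × Int)) (p : Int) :
    (absFrom p g).take (2 * g.length - 2) = absFrom p g.dropLast := by
  induction g generalizing p with
  | nil => simp [absFrom]
  | cons q t ih =>
    cases t with
    | nil => simp [absFrom]
    | cons r t' =>
      have e : 2 * (q :: r :: t').length - 2 = (2 * (r :: t').length - 2) + 1 + 1 := by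
        simp
        omega
      rw [List.dropLast_cons_of_ne_nil (by simp)]
      rw [show absFrom p (q :: r :: t') = (q.1 - p) :: (q.2 - q.1) :: absFrom q.2 (r :: t') from rfl]
      rw [show absFrom p (q :: (r :: t').dropLast)
            = (q.1 - p) :: (q.2 - q.1) :: absFrom q.2 (r :: t').dropLast from rfl]
      rw [e, List.take_succ_cons, List.take_succ_cons, ih q.2]

lemma absSpec_dropLast (g : List (Int × Int)) (h : 2 ≤ g.length) :
    (absSpec g).take ((absSpec g).length - 2) = absSpec g.dropLast := by
  cases g with
  | nil => simp at h
  | cons q t =>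
    cases t with
    | nil => simp at h
    | cons r t' =>
      rw [List.dropLast_cons_of_ne_nil (by simp)]
      simp only [absSpec]
      have e : ((q.2 - q.1) :: absFrom q.2 (r :: t')).length - 2
          = (2 * (r :: t').length - 2) + 1 := by
        simp [absFrom_length]
      rw [e, List.take_succ_cons]
      exact congrArg (List.cons _) (absFrom_dropLast (r :: t') q.2)

lemma achildK_cons (a : Int × Int) (g : List (Int × Int)) (k : Nat) :
    achildK (a :: g) (k + 1) = a :: achildK g k := by
  unfold achildK
  rw [show k + 1 + 2 = (k + 2) + 1 from by omega,
      show k + 1 + 3 = (k + 3) + 1 from by omega]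
  simp only [List.take_succ_cons, List.getD_cons_succ, List.drop_succ_cons, List.cons_append]

lemma bchildWK_cons (x y : Int) (w : List Int) (k : Nat) :
    bchildWK (x :: y :: w) (k + 1) = x :: y :: bchildWK w k := by
  unfold bchildWK
  rw [show 2 * (k + 1) + 1 = ((2 * k + 1) + 1) + 1 from by omega,
      show 2 * (k + 1) + 2 = ((2 * k + 2) + 1) + 1 from by omega,
      show 2 * (k + 1) + 4 = ((2 * k + 4) + 1) + 1 from by omega,
      show 2 * (k + 1) + 5 = ((2 * k + 5) + 1) + 1 from by omega,
      show 2 * (k + 1) + 6 = ((2 * k + 6) + 1) + 1 from by omega]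
  simp only [List.take_succ_cons, List.getD_cons_succ, List.drop_succ_cons, List.cons_append]

lemma bchildWK_cons_head (x : Int) (v : List Int) (k : Nat) :
    bchildWK (x :: v) k = x :: bchildK v k := by
  unfold bchildWK bchildK
  rw [show 2 * k + 2 = (2 * k + 1) + 1 from by omega,
      show 2 * k + 4 = (2 * k + 3) + 1 from by omega,
      show 2 * k + 5 = (2 * k + 4) + 1 from by omega,
      show 2 * k + 6 = (2 * k + 5) + 1 from by omega]
  simp only [List.take_succ_cons, List.getD_cons_succ, List.drop_succ_cons, List.cons_append]

lemma mid_corrK : ∀ (k : Nat) (g : List (Int × Int)) (p : Int), k + 3 ≤ g.length →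
    absFrom p (achildK g k) = bchildWK (absFrom p g) k := by
  intro k
  induction k with
  | zero =>
    intro g p hlen
    match g, hlen with
    | a :: b :: c :: t, _ =>
      unfold achildK bchildWK
      simp [absFrom, get_group_len]
      exact ⟨by ring, absFrom_shift t c.2 (b.2 - b.1)⟩
  | succ k ih =>
    intro g p hlen
    cases g with
    | nil => simp at hlen
    | cons a g' =>
      rw [achildK_cons]
      rw [show absFrom p (a :: achildK g' k)
            = (a.1 - p) :: (a.2 - a.1) :: absFrom a.2 (achildK g' k) from rfl]
      rw [show absFrom p (a :: g') = (a.1 - p) :: (a.2 - a.1) :: absFrom a.2 g' from rfl]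
      rw [bchildWK_cons]
      rw [ih g' a.2 (by simp only [List.length_cons] at hlen; omega)]

lemma absSpec_achildK (g : List (Int × Int)) (k : Nat) (hlen : k + 3 ≤ g.length) :
    absSpec (achildK g k) = bchildK (absSpec g) k := by
  cases g with
  | nil => simp at hlen
  | cons a g' =>
    have key := mid_corrK k (a :: g') 0 hlen
    rw [absFrom_cons] at key
    rw [bchildWK_cons_head] at key
    have hhead : ∃ x rest, achildK (a :: g') k = x :: rest ∧ x.1 = a.1 := by
      cases k with
      | zero => exact ⟨_, _, rfl, rfl⟩
      | succ k' =>
        rw [achildK_cons]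
        exact ⟨a, _, rfl, rfl⟩
    obtain ⟨x, rest, hx, hx1⟩ := hhead
    rw [hx] at key ⊢
    rw [absFrom_cons, hx1] at key
    exact ((List.cons.injEq _ _ _ _).mp key).2

lemma achildK_length (g : List (Int × Int)) (k : Nat) (hlen : k + 3 ≤ g.length) :
    (achildK g k).length = g.length - 2 := by
  unfold achildK
  simp
  omega

lemma bchildK_length_le (v : List Int) (k : Nat) (h : 2 * k + 4 ≤ v.length) :
    (bchildK v k).length ≤ v.length - 2 := by
  unfold bchildK
  simp
  omega

-- port-form (Int-indexed) to canonical-form conversions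
lemma pyGetD_int (v : List Int) (k : Nat) :
    (PySem.List.pyGet? v ((k : Int))).getD 0 = v.getD k 0 := by
  rw [PySem.List.pyGet?_natCast, List.getD_eq_getElem?_getD]

lemma pyGetD_pair (g : List (Int × Int)) (k : Nat) :
    (PySem.List.pyGet? g ((k : Int))).getD (0, 0) = g.getD k (0, 0) := by
  rw [PySem.List.pyGet?_natCast, List.getD_eq_getElem?_getD]

lemma midChildP_eq (v : List Int) (k : Nat) :
    midChildP v ((k : Int) + 1) = bchildK v k := by
  unfold midChildP bchildK
  rw [show 2 * ((k : Int) + 1) - 2 = ((2 * k : Nat) : Int) by push_cast; ring,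
      show 2 * ((k : Int) + 1) - 1 = ((2 * k + 1 : Nat) : Int) by push_cast; ring,
      show 2 * ((k : Int) + 1) + 1 = ((2 * k + 3 : Nat) : Int) by push_cast; ring,
      show 2 * ((k : Int) + 1) + 2 = ((2 * k + 4 : Nat) : Int) by push_cast; ring,
      show 2 * ((k : Int) + 1) + 3 = ((2 * k + 5 : Nat) : Int) by push_cast; ring]
  rw [PySem.List.slice_to_natCast, PySem.List.slice_from_natCast]
  simp only [pyGetD_int]

lemma midGuard_eq (v : List Int) (k : Nat) :
    (PySem.List.pyGet? v (2 * ((k : Int) + 1))).getD 0 = v.getD (2 * k + 2) 0 := by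
  rw [show 2 * ((k : Int) + 1) = ((2 * k + 2 : Nat) : Int) by push_cast; ring, pyGetD_int]

-- A's loop body for index k+1 is achildK g k
lemma aLeft_eq (g : List (Int × Int)) (k : Nat) (d : Int) (hlen : k + 3 ≤ g.length)
    (hd : d = get_group_len (g.getD (k + 1) (0, 0))) :
    (if (k : Int) + 1 < (g.length : Int) - 2 then
       PySem.List.slice g none (some ((k : Int) + 1 - 1)) ++
           [(((PySem.List.pyGet? g ((k : Int) + 1 - 1)).getD (0, 0)).1,
             ((PySem.List.pyGet? g ((k : Int) + 1 + 1)).getD (0, 0)).2 - d)] ++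
         List.map (fun p => (p.1 - d, p.2 - d))
           (PySem.List.slice g (some ((k : Int) + 1 + 2)) none)
     else
       PySem.List.slice g none (some ((k : Int) + 1 - 1)) ++
         [(((PySem.List.pyGet? g ((k : Int) + 1 - 1)).getD (0, 0)).1,
           ((PySem.List.pyGet? g ((k : Int) + 1 + 1)).getD (0, 0)).2 - d)])
    = achildK g k := by
  subst hd
  rw [show (k : Int) + 1 - 1 = ((k : Nat) : Int) by ring]
  rw [show (k : Int) + 1 + 2 = ((k + 3 : Nat) : Int) by push_cast; ring]
  rw [show (k : Int) + 1 + 1 = ((k + 2 : Nat) : Int) by push_cast; ring]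
  rw [PySem.List.slice_to_natCast, PySem.List.slice_from_natCast,
      pyGetD_pair, pyGetD_pair]
  unfold achildK
  by_cases h : (k : Int) + 1 < (g.length : Int) - 2
  · rw [if_pos h]
    simp
    rfl
  · rw [if_neg h]
    have hdrop : g.drop (k + 3) = [] := by
      apply List.drop_eq_nil_of_le
      omega
    rw [hdrop]
    simp

lemma loop_eq (f : Nat) (g : List (Int × Int)) (hf : g.length - 2 ≤ f)
    (hrec : ∀ g', g' ≠ [] → g'.length ≤ f → dfsFuel f g' = GF f (absSpec g')) :
    ∀ idxs res, (∀ i ∈ idxs, 1 ≤ i ∧ i ≤ (g.length : Int) - 2) →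
      dfsMidLoop (dfsFuel f) g idxs res = specMidLoop (GF f) (absSpec g) idxs res := by
  intro idxs
  induction idxs with
  | nil => intro res h; rfl
  | cons i rest ih =>
    intro res h
    obtain ⟨h1, h2⟩ := h i List.mem_cons_self
    obtain ⟨k, hk⟩ : ∃ k : Nat, i = (k : Int) + 1 := ⟨(i - 1).toNat, by omega⟩
    have hk3 : k + 3 ≤ g.length := by
      have hglen : (0 : Int) ≤ (g.length : Int) := by positivity
      omega
    subst hk
    simp only [dfsMidLoop, specMidLoop]
    have hgA : (PySem.List.pyGet? g ((k : Int) + 1)).getD (0, 0) = g.getD (k + 1) (0, 0) := by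
      rw [show (k : Int) + 1 = ((k + 1 : Nat) : Int) by push_cast; ring, pyGetD_pair]
    have hgB : (PySem.List.pyGet? (absSpec g) (2 * ((k : Int) + 1))).getD 0
        = get_group_len (g.getD (k + 1) (0, 0)) := by
      rw [midGuard_eq]
      have hx := absSpec_len_at g (k + 1) (by omega)
      rw [show 2 * (k + 1) = 2 * k + 2 by ring] at hx
      exact hx
    rw [hgA, hgB]
    split
    · exact ih res (fun j hj => h j (List.mem_cons_of_mem _ hj))
    · rw [aLeft_eq g k (get_group_len (g.getD (k + 1) (0, 0))) hk3 rfl,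
          midChildP_eq, ← absSpec_achildK g k hk3]
      have hne : achildK g k ≠ [] := by
        have := achildK_length g k hk3
        intro hc
        rw [hc] at this
        simp at this
        omega
      rw [hrec (achildK g k) hne (by rw [achildK_length g k hk3]; omega)]
      split
      · rfl
      · exact ih _ (fun j hj => h j (List.mem_cons_of_mem _ hj))

lemma mainAG : ∀ (f : Nat) (g : List (Int × Int)), g ≠ [] → g.length ≤ f →
    dfsFuel f g = GF f (absSpec g) := by
  intro f
  induction f with
  | zero =>
    intro g hne hlen
    cases g with
    | nil => exact absurd rfl hne
    | cons a t => simp at hlen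
  | succ f ih =>
    intro g hne hlen
    cases g with
    | nil => exact absurd rfl hne
    | cons a t =>
      cases t with
      | nil =>
        -- single group: both hit the length-1 branch
        simp [dfsFuel, GF, absSpec, absFrom]
      | cons b t2 =>
        have habs : absSpec (a :: b :: t2)
            = (a.2 - a.1) :: (b.1 - a.2) :: (b.2 - b.1) :: absFrom b.2 t2 := rfl
        simp only [dfsFuel, GF]
        have hcondA : ((a :: b :: t2).length == 1) = false := by
          simp
        have hcondB : ((absSpec (a :: b :: t2)).length == 1) = false := by
          rw [habs]
          simp
        rw [hcondA, hcondB]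
        simp only [Bool.false_eq_true, if_false]
        -- stage 1: first-element guard and child
        have hg0A : (PySem.List.pyGet? (a :: b :: t2) 0).getD (0, 0) = a :=
          by rw [PySem.List.pyGet?_zero_cons]; rfl
        have hg0B : (PySem.List.pyGet? (absSpec (a :: b :: t2)) 0).getD 0 = a.2 - a.1 := by
          rw [habs, PySem.List.pyGet?_zero_cons]; rfl
        have hch1A : PySem.List.slice (a :: b :: t2) (some 1) none = b :: t2 :=
          PySem.List.slice_from_one _
        have hch1B : PySem.List.slice (absSpec (a :: b :: t2)) (some 2) none
            = absSpec (b :: t2) := by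
          rw [show (2 : Int) = ((2 : Nat) : Int) from rfl, PySem.List.slice_from_natCast]
          exact absSpec_drop2 a (b :: t2) (by simp)
        rw [hg0A, hg0B, hch1A, hch1B]
        have hstage1 : dfsFuel f (b :: t2) = GF f (absSpec (b :: t2)) :=
          ih (b :: t2) (by simp) (by simp at hlen ⊢; omega)
        rw [show get_group_len a = a.2 - a.1 from rfl, hstage1]
        -- stage 2: ranges coincide and the loops agree
        have hm : PySem.Int.floordiv (((absSpec (a :: b :: t2)).length : Int)) 2
            = (((a :: b :: t2).length - 1 : Nat) : Int) := by
          rw [absSpec_length _ (by simp)]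
          rw [show (2 : Int) = ((2 : Nat) : Int) from by norm_num,
              PySem.Int.floordiv_natCast]
          congr 1
          omega
        have hcast : (((a :: b :: t2).length : Int) - 1)
            = ((((a :: b :: t2).length - 1 : Nat)) : Int) := by
          simp only [List.length_cons]
          omega
        rw [hm, ← hcast]
        have hloop := loop_eq f (a :: b :: t2)
          (by simp at hlen ⊢; omega) ih
          (PySem.List.pyRange 1 (((a :: b :: t2).length : Int) - 1) 1)
        rw [hloop _ (by
          intro i hi
          rw [PySem.List.mem_pyRange_one] at hi
          omega)]
        -- stage 3: last-element guard and child
        obtain ⟨q, hq⟩ : ∃ q, (a :: b :: t2).getLast? = some q := by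
          cases hq : (a :: b :: t2).getLast? with
          | none => rw [List.getLast?_eq_none_iff] at hq; simp at hq
          | some q => exact ⟨q, rfl⟩
        have hgLA : (PySem.List.pyGet? (a :: b :: t2) (-1)).getD (0, 0) = q := by
          rw [PySem.List.pyGet?_neg_one, hq]; rfl
        have hgLB : (PySem.List.pyGet? (absSpec (a :: b :: t2)) (-1)).getD 0
            = get_group_len q := by
          rw [PySem.List.pyGet?_neg_one, absSpec_last _ q hq]; rfl
        have hch3A : PySem.List.slice (a :: b :: t2) none (some (-1))
            = (a :: b :: t2).dropLast := PySem.List.slice_to_neg_one _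
        have hch3B : PySem.List.slice (absSpec (a :: b :: t2)) none (some (-2))
            = absSpec ((a :: b :: t2).dropLast) := by
          rw [PySem.List.slice_to_neg_ofNat _ 2 (by omega)]
          exact absSpec_dropLast _ (by simp)
        rw [hgLA, hgLB, hch3A, hch3B]
        have hstage3 : dfsFuel f ((a :: b :: t2).dropLast)
            = GF f (absSpec ((a :: b :: t2).dropLast)) := by
          apply ih
          · intro hc
            have := congrArg List.length hc
            simp at this
          · simp at hlen ⊢
            omega
        rw [hstage3]

lemma specMidLoop_congr (v : List Int) (r1 r2 : List Int → Bool) :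
    ∀ idxs res, (∀ i ∈ idxs, r1 (midChildP v i) = r2 (midChildP v i)) →
      specMidLoop r1 v idxs res = specMidLoop r2 v idxs res := by
  intro idxs
  induction idxs with
  | nil => intro res h; rfl
  | cons i rest ih =>
    intro res h
    simp only [specMidLoop]
    split
    · exact ih res (fun j hj => h j (List.mem_cons_of_mem _ hj))
    · rw [h i List.mem_cons_self]
      split
      · rfl
      · exact ih _ (fun j hj => h j (List.mem_cons_of_mem _ hj))

lemma midChild_len_le (v : List Int) (i : Int) (m : Nat)
    (h1 : 1 ≤ i) (h2 : i < ((m : Int))) (hm : 2 * m ≤ v.length) :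
    ∃ k : Nat, i = (k : Int) + 1 ∧ 2 * k + 4 ≤ v.length := by
  refine ⟨(i - 1).toNat, by omega, by omega⟩

lemma slice_from2_len (v : List Int) : (PySem.List.slice v (some 2) none) = v.drop 2 := by
  rw [show (2 : Int) = ((2 : Nat) : Int) from by norm_num, PySem.List.slice_from_natCast]

lemma GF_irrel : ∀ (f1 f2 : Nat) (v : List Int), v.length < 2 * f1 → v.length < 2 * f2 →
    GF f1 v = GF f2 v := by
  intro f1
  induction f1 with
  | zero => intro f2 v h1 _; omega
  | succ f ih =>
    intro f2 v h1 h2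
    obtain ⟨f2', rfl⟩ : ∃ f2', f2 = f2' + 1 := ⟨f2 - 1, by omega⟩
    simp only [GF]
    by_cases hl : v.length = 1
    · rw [hl]
      simp
    · have hbf : (v.length == 1) = false := by simp [hl]
      rw [hbf]
      simp only [Bool.false_eq_true, if_false]
      have hvlen : ∀ (guardVal : Int), guardVal = (PySem.List.pyGet? v 0).getD 0 →
          guardVal ≥ 2 → 2 ≤ v.length := by
        intro gv hgv hge
        cases v with
        | nil => rw [hgv] at hge; revert hge; decide
        | cons x xs =>
          simp only [List.length_cons]
          cases xs with
          | nil => simp at hl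
          | cons y ys => simp
      have hcong1 : (if (PySem.List.pyGet? v 0).getD 0 ≥ 2 then
            GF f (PySem.List.slice v (some 2) none) else false)
          = (if (PySem.List.pyGet? v 0).getD 0 ≥ 2 then
            GF f2' (PySem.List.slice v (some 2) none) else false) := by
        by_cases hg : (PySem.List.pyGet? v 0).getD 0 ≥ 2
        · rw [if_pos hg, if_pos hg]
          have h2le := hvlen _ rfl hg
          apply ih
          · rw [slice_from2_len]; simp; omega
          · rw [slice_from2_len]; simp; omega
        · rw [if_neg hg, if_neg hg]
      rw [hcong1]
      have hloop : ∀ res,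
          specMidLoop (GF f) v (PySem.List.pyRange 1 (PySem.Int.floordiv (v.length : Int) 2) 1) res
          = specMidLoop (GF f2') v (PySem.List.pyRange 1 (PySem.Int.floordiv (v.length : Int) 2) 1) res := by
        intro res
        apply specMidLoop_congr
        intro i hi
        rw [PySem.List.mem_pyRange_one] at hi
        rw [show (2 : Int) = ((2 : Nat) : Int) from by norm_num,
            PySem.Int.floordiv_natCast] at hi
        obtain ⟨k, hk, hkb⟩ := midChild_len_le v i (v.length / 2) hi.1 hi.2 (by omega)
        subst hk
        rw [midChildP_eq]
        have hble := bchildK_length_le v k hkb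
        apply ih
        · omega
        · omega
      rw [hloop]
      have hcong3 : ∀ res : Bool, (if !res && (PySem.List.pyGet? v (-1)).getD 0 ≥ 2 then
            GF f (PySem.List.slice v none (some (-2))) else res)
          = (if !res && (PySem.List.pyGet? v (-1)).getD 0 ≥ 2 then
            GF f2' (PySem.List.slice v none (some (-2))) else res) := by
        intro res
        by_cases hg : (!res && (PySem.List.pyGet? v (-1)).getD 0 ≥ 2 : Bool) = true
        · rw [if_pos hg, if_pos hg]
          have hge : ((PySem.List.pyGet? v (-1)).getD 0 ≥ 2 : Prop) :=
            of_decide_eq_true ((Bool.and_eq_true _ _).mp hg).2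
          have hvne : v ≠ [] := by
            intro hc
            subst hc
            revert hge
            decide
          have h2le : 2 ≤ v.length := by
            cases v with
            | nil => exact absurd rfl hvne
            | cons x xs =>
              cases xs with
              | nil => simp at hl
              | cons y ys => simp
          rw [PySem.List.slice_to_neg_ofNat _ 2 (by omega)]
          apply ih
          · simp; omega
          · simp; omega
        · rw [if_neg hg, if_neg hg]
      rw [hcong3]

-- the canonical fuel for a memo entry, and the memo invariant
def cF (v : List Int) : Nat := v.length / 2 + 1

def MemoOK (memo : PySem.Dict (List Int) Bool) : Prop :=
  ∀ k b, memo.get? k = some b → b = GF (cF k) k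

lemma solveLoop_corr (f : Nat) (v : List Int) :
    ∀ idxs, (∀ i ∈ idxs, ∀ memo, MemoOK memo →
        (solveFuel f (midChildP v i) memo).1 = GF f (midChildP v i) ∧
        MemoOK (solveFuel f (midChildP v i) memo).2) →
      ∀ res memo, MemoOK memo →
        (solveMidLoop (solveFuel f) v idxs res memo).1 = specMidLoop (GF f) v idxs res ∧
        MemoOK (solveMidLoop (solveFuel f) v idxs res memo).2 := by
  intro idxs
  induction idxs with
  | nil => intro _ res memo hm; exact ⟨rfl, hm⟩
  | cons i rest ih =>
    intro hchild res memo hm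
    simp only [solveMidLoop, specMidLoop]
    split
    · exact ih (fun j hj => hchild j (List.mem_cons_of_mem _ hj)) res memo hm
    · obtain ⟨he, hm2⟩ := hchild i List.mem_cons_self memo hm
      by_cases hc : (solveFuel f (midChildP v i) memo).1 = true
      · rw [if_pos hc, if_pos (he ▸ hc)]
        exact ⟨he, hm2⟩
      · have hc' : (solveFuel f (midChildP v i) memo).1 = false := by
          simpa using hc
        have hgf : GF f (midChildP v i) = false := he ▸ hc'
        rw [if_neg (by simp [hc']), if_neg (by simp [hgf])]
        rw [← he]
        exact ih (fun j hj => hchild j (List.mem_cons_of_mem _ hj))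
          (solveFuel f (midChildP v i) memo).1 (solveFuel f (midChildP v i) memo).2 hm2

lemma solve_corr : ∀ (f : Nat) (v : List Int) (memo : PySem.Dict (List Int) Bool),
    v.length < 2 * f → MemoOK memo →
    (solveFuel f v memo).1 = GF f v ∧ MemoOK (solveFuel f v memo).2 := by
  intro f
  induction f with
  | zero => intro v memo h _; omega
  | succ f ih =>
    intro v memo hvf hm
    simp only [solveFuel, GF]
    by_cases hl : v.length = 1
    · have hbt : (v.length == 1) = true := by simp [hl]
      rw [hbt]
      simp only [if_true]
      exact ⟨by trivial, hm⟩
    · have hbf : (v.length == 1) = false := by simp [hl]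
      rw [hbf]
      simp only [Bool.false_eq_true, if_false]
      cases hget : memo.get? v with
      | some b =>
        refine ⟨?_, hm⟩
        have hb := (hm v b hget).trans (GF_irrel (cF v) (f + 1) v (by unfold cF; omega) hvf)
        rw [hb]
        simp only [GF]
        rw [hbf]
        simp only [Bool.false_eq_true, if_false]
      | none =>
        have hchild : ∀ i ∈ PySem.List.pyRange 1 (PySem.Int.floordiv (v.length : Int) 2) 1,
            ∀ memo', MemoOK memo' →
            (solveFuel f (midChildP v i) memo').1 = GF f (midChildP v i) ∧
            MemoOK (solveFuel f (midChildP v i) memo').2 := by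
          intro i hi memo' hm'
          rw [PySem.List.mem_pyRange_one] at hi
          rw [show (2 : Int) = ((2 : Nat) : Int) from by norm_num,
              PySem.Int.floordiv_natCast] at hi
          obtain ⟨k, hk, hkb⟩ := midChild_len_le v i (v.length / 2) hi.1 hi.2 (by omega)
          subst hk
          rw [midChildP_eq]
          have hble := bchildK_length_le v k hkb
          exact ih _ memo' (by omega) hm'
        have hMemoIns : ∀ (d : PySem.Dict (List Int) Bool) (r : Bool),
            MemoOK d → r = GF (f + 1) v → MemoOK (d.insert v r) := by
          intro d r hd hr k b hkb
          rw [PySem.Dict.get?_insert] at hkb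
          split_ifs at hkb with hkv
          · cases hkb
            rw [hkv, hr]
            exact GF_irrel (f + 1) (cF v) v hvf (by unfold cF; omega)
          · exact hd k b hkb
        by_cases hg1 : (PySem.List.pyGet? v 0).getD 0 ≥ 2
        · rw [if_pos hg1, if_pos hg1]
          have h2le : 2 ≤ v.length := by
            cases v with
            | nil => revert hg1; decide
            | cons x xs =>
              cases xs with
              | nil => simp at hl
              | cons y ys => simp
          obtain ⟨he1, hm1⟩ := ih (PySem.List.slice v (some 2) none) memo
            (by rw [slice_from2_len]; simp; omega) hm
          rw [he1]
          obtain ⟨heL, hmL⟩ := solveLoop_corr f v _ hchild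
            (GF f (PySem.List.slice v (some 2) none))
            (solveFuel f (PySem.List.slice v (some 2) none) memo).2 hm1
          rw [heL]
          by_cases hg3 : (!specMidLoop (GF f) v
              (PySem.List.pyRange 1 (PySem.Int.floordiv (v.length : Int) 2) 1)
              (GF f (PySem.List.slice v (some 2) none)) &&
              decide ((PySem.List.pyGet? v (-1)).getD 0 ≥ 2)) = true
          · rw [if_pos hg3, if_pos hg3]
            have hge : ((PySem.List.pyGet? v (-1)).getD 0 ≥ 2 : Prop) :=
              of_decide_eq_true ((Bool.and_eq_true _ _).mp hg3).2
            obtain ⟨he3, hm3⟩ := ih (PySem.List.slice v none (some (-2))) _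
              (by rw [PySem.List.slice_to_neg_ofNat _ 2 (by omega)]; simp; omega) hmL
            rw [he3]
            refine ⟨rfl, hMemoIns _ _ hm3 ?_⟩
            simp only [GF]
            rw [hbf]
            simp only [Bool.false_eq_true, if_false]
            rw [if_pos hg1, if_pos hg3]
          · rw [if_neg hg3, if_neg hg3]
            refine ⟨heL, hMemoIns _ _ hmL ?_⟩
            rw [heL]
            simp only [GF]
            rw [hbf]
            simp only [Bool.false_eq_true, if_false]
            rw [if_pos hg1, if_neg hg3]
        · rw [if_neg hg1, if_neg hg1]
          obtain ⟨heL, hmL⟩ := solveLoop_corr f v _ hchild false memo hm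
          rw [show ((false, memo) : Bool × PySem.Dict (List Int) Bool).1 = false from rfl,
              show ((false, memo) : Bool × PySem.Dict (List Int) Bool).2 = memo from rfl]
          rw [heL]
          by_cases hg3 : (!specMidLoop (GF f) v
              (PySem.List.pyRange 1 (PySem.Int.floordiv (v.length : Int) 2) 1) false &&
              decide ((PySem.List.pyGet? v (-1)).getD 0 ≥ 2)) = true
          · rw [if_pos hg3, if_pos hg3]
            have hge : ((PySem.List.pyGet? v (-1)).getD 0 ≥ 2 : Prop) :=
              of_decide_eq_true ((Bool.and_eq_true _ _).mp hg3).2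
            have hvne : v ≠ [] := by
              intro hc
              subst hc
              revert hge
              decide
            have h2le : 2 ≤ v.length := by
              cases v with
              | nil => exact absurd rfl hvne
              | cons x xs =>
                cases xs with
                | nil => simp at hl
                | cons y ys => simp
            obtain ⟨he3, hm3⟩ := ih (PySem.List.slice v none (some (-2))) _
              (by rw [PySem.List.slice_to_neg_ofNat _ 2 (by omega)]; simp; omega) hmL
            rw [he3]
            refine ⟨rfl, hMemoIns _ _ hm3 ?_⟩
            simp only [GF]
            rw [hbf]
            simp only [Bool.false_eq_true, if_false]
            rw [if_neg hg1, if_pos hg3]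
          · rw [if_neg hg3, if_neg hg3]
            refine ⟨heL, hMemoIns _ _ hmL ?_⟩
            rw [heL]
            simp only [GF]
            rw [hbf]
            simp only [Bool.false_eq_true, if_false]
            rw [if_neg hg1, if_neg hg3]

lemma buildAbs_fold : ∀ (g : List (Int × Int)) (acc : List Int) (p : Int),
    (g.foldl
      (fun (st : List Int × Option Int) q =>
        let v := match st.2 with
          | some prev => st.1 ++ [q.1 - prev]
          | none => st.1
        (v ++ [q.2 - q.1], some q.2))
      (acc, some p)).1 = acc ++ absFrom p g := by
  intro g
  induction g with
  | nil => intro acc p; simp [absFrom]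
  | cons q t ih =>
    intro acc p
    simp only [List.foldl_cons]
    exact (ih (acc ++ [q.1 - p] ++ [q.2 - q.1]) q.2).trans (by simp [absFrom])

lemma buildAbs_eq (g : List (Int × Int)) : buildAbs g = absSpec g := by
  cases g with
  | nil => rfl
  | cons q t =>
    unfold buildAbs
    simp only [List.foldl_cons]
    exact (buildAbs_fold t [q.2 - q.1] q.2).trans (by simp [absSpec])

-- ===== VERDICT (by name: the statement is the Claim_ definition above) =====
theorem dfs_spec : Claim_equal_dfs := by
  intro g _ hpre
  unfold Spec_dfs dfs dfs_alt
  rw [buildAbs_eq]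
  have hlen1 : 1 ≤ g.length := by
    cases g with
    | nil => exact absurd rfl hpre
    | cons a t => simp
  have h2 := solve_corr g.length (absSpec g) PySem.Dict.empty
    (by rw [absSpec_length g hpre]; omega)
    (by intro k b hkb; rw [PySem.Dict.get?_empty] at hkb; cases hkb)
  rw [mainAG g.length g hpre (le_refl _), h2.1]
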